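-- pv_equiv track=rewrite | github.com/mdalzell/advent-of-code-2019 | aoc2019/helpers/day22.py | _dealWithIncrement
-- ===== SOURCE A (Python) =====
-- def _dealWithIncrement(deck, increment):
--     currentIndex = 0
--     newDeck = [None] * len(deck)
--
--     while len(deck) > 0:
--         currentCard = deck.pop(0)
--         newDeck[currentIndex] = currentCard
--
--         currentIndex += increment
--
--         if currentIndex > len(newDeck) - 1:
--             currentIndex = currentIndex - len(newDeck)
--
--     return newDeck
-- ===== SOURCE B (Python) =====
-- def _dealWithIncrement(deck, increment):
--     n = len(deck)
--     newDeck = [None] * n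
--     for i, card in enumerate(deck):
--         newDeck[(i * increment) % n] = card
--     return newDeck
-- ===== Notes on version B (the rewrite author's own statement) =====
-- stated objective: faster
-- what changed: A repeatedly pops the front of the deck (O(n) each) and steps/wraps a running index; B is a single enumerate pass writing each card directly to slot (i*increment) % n.
-- outside the precondition, e.g. on _dealWithIncrement([1, 2], 0): A returns [2, None], B returns [2, None]; on _dealWithIncrement([1, 2, 3, 4], 2): A returns [3, None, 4, None], B returns [3, None, 4, None]; on _dealWithIncrement([1, 2, 3], 5): A raises IndexError, B returns [1, 3, 2]
import Mathlib
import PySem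

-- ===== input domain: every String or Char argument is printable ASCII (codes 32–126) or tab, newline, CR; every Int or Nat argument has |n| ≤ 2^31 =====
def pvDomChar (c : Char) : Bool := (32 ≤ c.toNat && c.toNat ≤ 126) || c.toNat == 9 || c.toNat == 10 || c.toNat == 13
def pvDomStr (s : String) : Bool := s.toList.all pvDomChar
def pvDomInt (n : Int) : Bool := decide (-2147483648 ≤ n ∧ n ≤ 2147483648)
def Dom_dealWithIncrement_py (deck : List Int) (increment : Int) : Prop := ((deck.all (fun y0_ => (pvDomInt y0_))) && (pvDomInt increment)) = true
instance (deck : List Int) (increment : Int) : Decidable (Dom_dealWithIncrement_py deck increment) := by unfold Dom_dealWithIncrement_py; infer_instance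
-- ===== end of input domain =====

-- B replaces A's quadratic pop(0)/stepwise-wrap loop by one pass writing deck[i] to slot (i*increment) % n.
-- Side effect note: Python A empties `deck` in place (pop(0)); B does not mutate it. The claim is about the return value.

-- ===== PORT A =====
-- A's while loop: pop the front card, place it at currentIndex, advance by increment, wrap once by -n.
-- newDeck starts as [None]*n, modelled as List (Option Int); the final `.map (getD 0)` only converts to the
-- declared List Int type — under Pre_ every slot has been written, so no default is ever read.
def dwiLoopA (increment : Int) : List Int → Int → List (Option Int) → List (Option Int)
  | [], _, newDeck => newDeck
  | currentCard :: deck, currentIndex, newDeck =>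
    let newDeck' := PySem.List.pySetD newDeck currentIndex (some currentCard)
    let ci := currentIndex + increment
    let ci' := if ci > (newDeck'.length : Int) - 1 then ci - (newDeck'.length : Int) else ci
    dwiLoopA increment deck ci' newDeck'

def dealWithIncrement_py (deck : List Int) (increment : Int) : List Int :=
  (dwiLoopA increment deck 0 (List.replicate deck.length (none : Option Int))).map (fun o => o.getD 0)

-- ===== PORT B =====
-- B: newDeck[(i*increment) % n] = deck[i] in one enumerate pass.
def dealWithIncrement_py_alt (deck : List Int) (increment : Int) : List Int :=
  let n : Int := deck.length
  let newDeck : List (Option Int) := List.replicate deck.length (none : Option Int)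
  ((PySem.List.enumerate deck).foldl
      (fun nd p => PySem.List.pySetD nd (PySem.Int.mod (p.1 * increment) n) (some p.2))
      newDeck).map (fun o => o.getD 0)

-- ===== PRECONDITION & SPEC =====
-- Pre_ excludes (a) inputs where A raises IndexError (increment outside [-1, n+1] drives currentIndex out of
-- range, since A wraps by subtracting n only once and never corrects negative indices), and (b) inputs where
-- gcd(increment, n) ≠ 1, on which A returns a list still containing None — not a value of type List Int.
def Pre_dealWithIncrement_py (deck : List Int) (increment : Int) : Prop :=
  deck.length ≤ 1 ∨
    (-1 ≤ increment ∧ increment ≤ (deck.length : Int) + 1 ∧ Int.gcd increment (deck.length : Int) = 1)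
instance (deck : List Int) (increment : Int) : Decidable (Pre_dealWithIncrement_py deck increment) := by
  unfold Pre_dealWithIncrement_py; infer_instance

def pvWitness_dealWithIncrement_py : List Int × Int := ([3, 1, 4, 1, 5], 2)

def Spec_dealWithIncrement_py (deck : List Int) (increment : Int) (out : List Int) : Prop := out = dealWithIncrement_py_alt deck increment
instance (deck : List Int) (increment : Int) (out : List Int) : Decidable (Spec_dealWithIncrement_py deck increment out) := by unfold Spec_dealWithIncrement_py; infer_instance

-- ===== CLAIM (what is proved, stated in full; the proofs are below) =====
def Claim_equal_dealWithIncrement_py : Prop := ∀ (deck : List Int) (increment : Int), Dom_dealWithIncrement_py deck increment → Pre_dealWithIncrement_py deck increment → Spec_dealWithIncrement_py deck increment (dealWithIncrement_py deck increment)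

-- ===== LEMMAS AND PROOFS =====

-- A's currentIndex before placing the (k+1)-st card (valid while k < n):
-- 0, then k*increment stepped with a single wrap — which is -(k) when increment = -1, and (k*increment) % n otherwise.
def ciF (inc : Int) (n : Nat) (k : Nat) : Int :=
  if inc = -1 then -(k : Int) else ((k : Int) * inc) % (n : Int)

-- canonical loop both ports reduce to: place card k at slot ((k*inc) % n).toNat
def goPlace (inc : Int) (n : Nat) : List Int → Nat → List (Option Int) → List (Option Int)
  | [], _, nd => nd
  | c :: rest, k, nd => goPlace inc n rest (k + 1) (nd.set (((k : Int) * inc) % (n : Int)).toNat (some c))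

theorem pySetD_neg {α : Type} (xs : List α) (v : α) (k : Nat) (h1 : 0 < k) (h2 : k ≤ xs.length) :
    PySem.List.pySetD xs (-(k : Int)) v = xs.set (xs.length - k) v := by
  have hk2 : -(xs.length : Int) ≤ -(k : Int) := by omega
  have hne : ¬ k = 0 := by omega
  simp [PySem.List.pySetD, PySem.List.pySet?, PySem.List.pyIdx?, hk2, hne]

theorem ciF_zero (inc : Int) (n : Nat) : ciF inc n 0 = 0 := by
  simp [ciF]

theorem neg_emod_eq (k : Nat) (n : Nat) (h1 : 0 < k) (h2 : k < n) :
    (-(k : Int)) % (n : Int) = (n : Int) - k := by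
  have h := Int.add_mul_emod_self_left (a := -(k : Int)) (b := (n : Int)) (c := 1)
  have h2' : (-(k : Int) + (n : Int) * 1) % (n : Int) = -(k : Int) + (n : Int) * 1 :=
    Int.emod_eq_of_lt (by omega) (by omega)
  omega

theorem setEq (inc : Int) (n : Nat) (c : Int) (nd : List (Option Int)) (k : Nat)
    (hn : 0 < n) (hlen : nd.length = n) (hk : k < n) (h1 : -1 ≤ inc) :
    PySem.List.pySetD nd (ciF inc n k) (some c)
      = nd.set (((k : Int) * inc) % (n : Int)).toNat (some c) := by
  by_cases hinc : inc = -1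
  · subst hinc
    rcases Nat.eq_zero_or_pos k with hk0 | hk0
    · subst hk0
      simp [ciF, PySem.List.pySetD_of_nonneg]
    · have hneg : ciF (-1) n k = -(k : Int) := by simp [ciF]
      rw [hneg, pySetD_neg nd (some c) k hk0 (by omega)]
      have hmod : ((k : Int) * (-1)) % (n : Int) = (n : Int) - k := by
        rw [show (k : Int) * (-1) = -(k : Int) by ring]
        exact neg_emod_eq k n hk0 hk
      rw [hmod, hlen]
      congr 1
      omega
  · have hpos : (0 : Int) ≤ ((k : Int) * inc) % (n : Int) :=
      Int.emod_nonneg _ (by omega)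
    have hciF : ciF inc n k = ((k : Int) * inc) % (n : Int) := by simp [ciF, hinc]
    rw [hciF, PySem.List.pySetD_of_nonneg nd (some c) hpos]

theorem kmul_succ_emod (k : Nat) (n : Nat) (hk : k < n) :
    ((k : Int) * ((n : Int) + 1)) % (n : Int) = (k : Int) := by
  have h := Int.add_mul_emod_self_left (a := (k : Int)) (b := (n : Int)) (c := (k : Int))
  have h2 : (k : Int) % (n : Int) = (k : Int) := Int.emod_eq_of_lt (by omega) (by omega)
  calc ((k : Int) * ((n : Int) + 1)) % (n : Int)
      = ((k : Int) + (n : Int) * (k : Int)) % (n : Int) := by ring_nf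
    _ = (k : Int) := by rw [h, h2]

theorem ciStep (inc : Int) (n : Nat) (k : Nat)
    (h1 : -1 ≤ inc) (h2 : inc ≤ (n : Int) + 1) (hk : k + 1 < n) :
    (if ciF inc n k + inc > (n : Int) - 1 then ciF inc n k + inc - (n : Int) else ciF inc n k + inc)
      = ciF inc n (k + 1) := by
  by_cases hinc : inc = -1
  · subst hinc
    rw [show ciF (-1) n k = -(k : Int) by simp [ciF],
      show ciF (-1) n (k + 1) = -(((k + 1 : Nat)) : Int) by simp [ciF]]
    split <;> push_cast <;> omega
  · have hinc0 : 0 ≤ inc := by omega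
    have hA : ciF inc n k = ((k : Int) * inc) % (n : Int) := by simp [ciF, hinc]
    have hB : ciF inc n (k + 1) = (((k : Nat) + 1 : Nat) : Int) * inc % (n : Int) := by
      simp [ciF, hinc]
    set a := ((k : Int) * inc) % (n : Int) with ha
    have ha0 : 0 ≤ a := Int.emod_nonneg _ (by omega)
    have ha1 : a < (n : Int) := Int.emod_lt_of_pos _ (by omega)
    have hcongr : (((k : Nat) + 1 : Nat) : Int) * inc % (n : Int) = (a + inc) % (n : Int) := by
      rw [ha, Int.emod_add_emod]
      congr 1; push_cast; ring
    rw [hA, hB, hcongr]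
    by_cases hbr : a + inc > (n : Int) - 1
    · rw [if_pos hbr]
      -- exclude a + inc = 2n: that needs inc = n+1 and a = n-1, but with inc = n+1, a = k < n-1
      have hne2n : a + inc < 2 * (n : Int) := by
        by_cases hbig : inc = (n : Int) + 1
        · have : a = (k : Int) := by rw [ha, hbig]; exact kmul_succ_emod k n (by omega)
          omega
        · omega
      have : (a + inc - (n : Int)) % (n : Int) = a + inc - (n : Int) :=
        Int.emod_eq_of_lt (by omega) (by omega)
      have hsub : (a + inc - (n : Int)) % (n : Int) = (a + inc) % (n : Int) := by
        have h3 := Int.add_mul_emod_self_left (a := a + inc - (n : Int)) (b := (n : Int)) (c := 1)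
        rw [show a + inc - (n : Int) + (n : Int) * 1 = a + inc by ring] at h3
        exact h3.symm
      omega
    · rw [if_neg hbr]
      exact (Int.emod_eq_of_lt (by omega) (by omega)).symm

theorem loopA (inc : Int) (n : Nat) (hn : 0 < n) (h1 : -1 ≤ inc) (h2 : inc ≤ (n : Int) + 1) :
    ∀ (rest : List Int) (k : Nat) (nd : List (Option Int)),
      nd.length = n → k + rest.length = n →
      dwiLoopA inc rest (ciF inc n k) nd = goPlace inc n rest k nd := by
  intro rest
  induction rest with
  | nil => intro k nd _ _; rfl
  | cons c rest ih =>
    intro k nd hlen hcount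
    have hk : k < n := by simp at hcount; omega
    simp only [dwiLoopA, goPlace]
    rw [setEq inc n c nd k hn hlen hk h1]
    set nd' := nd.set (((k : Int) * inc) % (n : Int)).toNat (some c) with hnd'
    have hlen' : nd'.length = n := by rw [hnd', List.length_set, hlen]
    rw [hlen']
    cases rest with
    | nil => simp [dwiLoopA, goPlace]
    | cons d rest' =>
      have hk1 : k + 1 < n := by simp at hcount; omega
      rw [ciStep inc n k h1 h2 hk1]
      exact ih (k + 1) nd' hlen' (by simp at hcount ⊢; omega)

theorem loopB (inc : Int) (n : Nat) (hn : 0 < n) :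
    ∀ (rest : List Int) (k : Nat) (nd : List (Option Int)),
      nd.length = n →
      (PySem.List.enumerate rest (k : Int)).foldl
          (fun nd p => PySem.List.pySetD nd (PySem.Int.mod (p.1 * inc) (n : Int)) (some p.2)) nd
        = goPlace inc n rest k nd := by
  intro rest
  induction rest with
  | nil => intro k nd _; rfl
  | cons c rest ih =>
    intro k nd hlen
    rw [PySem.List.enumerate_cons, List.foldl_cons]
    simp only [goPlace]
    have hmod : PySem.Int.mod ((k : Int) * inc) (n : Int) = ((k : Int) * inc) % (n : Int) :=
      PySem.Int.mod_eq_emod_of_pos (by omega)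
    have hpos : (0 : Int) ≤ ((k : Int) * inc) % (n : Int) := Int.emod_nonneg _ (by omega)
    rw [hmod, PySem.List.pySetD_of_nonneg nd (some c) hpos]
    have hcast : (k : Int) + 1 = ((k + 1 : Nat) : Int) := by push_cast; ring
    rw [hcast]
    exact ih (k + 1) _ (by rw [List.length_set, hlen])

-- ===== VERDICT (by name: the statement is the Claim_ definition above) =====
theorem dealWithIncrement_py_spec : Claim_equal_dealWithIncrement_py := by
  intro deck increment _ hpre
  unfold Spec_dealWithIncrement_py
  match deck with
  | [] => rfl
  | [c] =>
    simp [dealWithIncrement_py, dealWithIncrement_py_alt, dwiLoopA, PySem.List.enumerate,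
      PySem.List.pySetD_of_nonneg, PySem.Int.mod]
  | c :: d :: rest =>
    set dk := c :: d :: rest with hdk
    have hn : 0 < dk.length := by simp [hdk]
    rcases hpre with hlen | ⟨h1, h2, _⟩
    · simp [hdk] at hlen
    · have hA : dealWithIncrement_py dk increment
          = (goPlace increment dk.length dk 0
              (List.replicate dk.length (none : Option Int))).map (fun o => o.getD 0) := by
        unfold dealWithIncrement_py
        rw [← ciF_zero increment dk.length,
          loopA increment dk.length hn h1 h2 dk 0 _ (by simp) (by simp)]
      have hB : dealWithIncrement_py_alt dk increment
          = (goPlace increment dk.length dk 0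
              (List.replicate dk.length (none : Option Int))).map (fun o => o.getD 0) := by
        unfold dealWithIncrement_py_alt
        dsimp only
        rw [show (0 : Int) = ((0 : Nat) : Int) by rfl,
          loopB increment dk.length hn dk 0 _ (by simp)]
      rw [hA, hB]
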